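-- pv_equiv track=rewrite | github.com/tungedng2710/DMOM-RAG | tonrag/dataset.py | ensure_field
-- ===== SOURCE A (Python) =====
-- from typing import Any, Dict, List, Tuple, Optional
--
-- def ensure_field(name: str, columns: List[str], fallback_list: List[str]) -> str:
--     for candidate in fallback_list:
--         if candidate in columns:
--             return candidate
--     # Try case-insensitive match
--     lower_map = {c.lower(): c for c in columns}
--     for candidate in fallback_list:
--         if candidate.lower() in lower_map:
--             return lower_map[candidate.lower()]
--     raise ValueError(f"Could not find required field '{name}'. Available columns: {columns}")
-- ===== SOURCE B (Python) =====
-- def ensure_field(name, columns, fallback_list):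
--     lower_map = {c.lower(): c for c in columns}
--     ci_match = None
--     for candidate in fallback_list:
--         if candidate in columns:
--             return candidate
--         if ci_match is None and candidate.lower() in lower_map:
--             ci_match = lower_map[candidate.lower()]
--     if ci_match is not None:
--         return ci_match
--     raise ValueError(f"Could not find required field '{name}'. Available columns: {columns}")
-- ===== Notes on version B (the rewrite author's own statement) =====
-- stated objective: alternative
-- what changed: Fuses A's two passes over fallback_list into a single pass that returns exact matches immediately and records the first case-insensitive match in an accumulator, returned after the loop.
import Mathlib
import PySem

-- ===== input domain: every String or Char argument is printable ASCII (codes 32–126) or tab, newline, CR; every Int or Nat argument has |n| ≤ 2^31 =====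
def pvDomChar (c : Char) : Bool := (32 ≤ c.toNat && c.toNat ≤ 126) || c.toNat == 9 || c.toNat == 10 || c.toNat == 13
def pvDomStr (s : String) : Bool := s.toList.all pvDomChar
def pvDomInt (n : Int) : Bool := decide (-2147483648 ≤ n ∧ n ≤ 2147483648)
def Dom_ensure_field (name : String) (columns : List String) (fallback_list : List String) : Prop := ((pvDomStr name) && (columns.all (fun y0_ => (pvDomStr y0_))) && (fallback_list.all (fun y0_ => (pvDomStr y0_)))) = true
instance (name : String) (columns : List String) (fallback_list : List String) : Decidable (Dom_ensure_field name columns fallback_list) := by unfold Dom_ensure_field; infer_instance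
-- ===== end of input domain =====

-- ===== PORT A =====
-- B fuses A's two passes over fallback_list into one pass; the ValueError case (no match) lies outside Pre_.
-- Port of A's first loop: first candidate exactly in columns.
def pvA_exact (cols : List String) : List String → Option String
  | [] => none
  | c :: rest => if cols.contains c then some c else pvA_exact cols rest

-- Port of A's lower_map comprehension (dict: later columns overwrite earlier ones).
def pvLowerMap (cols : List String) : PySem.Dict String String :=
  cols.foldl (fun d c => d.insert (PySem.Str.lower c) c) (PySem.Dict.empty)

-- Port of A's second loop: first candidate whose lowercase is a key of lower_map.
def pvA_ci (lm : PySem.Dict String String) : List String → Option String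
  | [] => none
  | c :: rest =>
    match lm.get? (PySem.Str.lower c) with
    | some v => some v
    | none => pvA_ci lm rest

def ensure_field (name : String) (columns : List String) (fallback_list : List String) : String :=
  match pvA_exact columns fallback_list with
  | some c => c
  | none =>
    let lm := pvLowerMap columns
    match pvA_ci lm fallback_list with
    | some c => c
    | none => ""  -- Python raises ValueError here; excluded by Pre_ensure_field

-- ===== PORT B =====
-- B's single loop: return an exact match at once, else record the first case-insensitive match.
def pvB_go (cols : List String) (lm : PySem.Dict String String) :
    List String → Option String → String
  | [], ci => ci.getD ""  -- Python raises ValueError when ci is None; excluded by Pre_ensure_field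
  | c :: rest, ci =>
    if cols.contains c then c
    else
      let ci' := if ci.isNone && (lm.get? (PySem.Str.lower c)).isSome
                 then lm.get? (PySem.Str.lower c) else ci
      pvB_go cols lm rest ci'

def ensure_field_alt (name : String) (columns : List String) (fallback_list : List String) : String :=
  let lm := pvLowerMap columns
  pvB_go columns lm fallback_list none

-- ===== PRECONDITION & SPEC =====
-- Pre_ excludes exactly the inputs where A raises ValueError: no candidate matches any column
-- even case-insensitively.
def Pre_ensure_field (name : String) (columns : List String) (fallback_list : List String) : Prop :=
  ∃ cand ∈ fallback_list, ∃ c ∈ columns, PySem.Str.lower cand = PySem.Str.lower c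
instance (name : String) (columns : List String) (fallback_list : List String) : Decidable (Pre_ensure_field name columns fallback_list) := by unfold Pre_ensure_field; infer_instance

def pvWitness_ensure_field : String × List String × List String := ("f", ["Id", "Name"], ["name"])

def Spec_ensure_field (name : String) (columns : List String) (fallback_list : List String) (out : String) : Prop := out = ensure_field_alt name columns fallback_list
instance (name : String) (columns : List String) (fallback_list : List String) (out : String) : Decidable (Spec_ensure_field name columns fallback_list out) := by unfold Spec_ensure_field; infer_instance

-- ===== CLAIM (what is proved, stated in full; the proofs are below) =====
def Claim_equal_ensure_field : Prop := ∀ (name : String) (columns : List String) (fallback_list : List String), Dom_ensure_field name columns fallback_list → Pre_ensure_field name columns fallback_list → Spec_ensure_field name columns fallback_list (ensure_field name columns fallback_list)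

-- ===== LEMMAS AND PROOFS =====
-- B's fused loop equals: A's exact pass if it hits, else the recorded/ci result.
theorem pvB_go_eq (cols : List String) (lm : PySem.Dict String String) :
    ∀ (fb : List String) (ci : Option String),
      pvB_go cols lm fb ci =
        match pvA_exact cols fb with
        | some c => c
        | none => (match ci with | some x => some x | none => pvA_ci lm fb).getD "" := by
  intro fb
  induction fb with
  | nil => intro ci; cases ci <;> simp [pvB_go, pvA_exact, pvA_ci]
  | cons c rest ih =>
    intro ci
    by_cases h : c ∈ cols
    · simp [pvB_go, pvA_exact, h]
    · simp only [pvB_go, pvA_exact, List.contains_eq_mem, h, decide_eq_true_eq, if_false, decide_false, Bool.false_eq_true, if_neg]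
      rw [ih]
      cases hl1 : pvA_exact cols rest with
      | some d => cases ci <;> simp [hl1, pvA_ci] <;> cases hlk : lm.get? (PySem.Str.lower c) <;> simp [hlk]
      | none =>
        cases ci with
        | some x => simp [hl1]
        | none =>
          cases hlk : lm.get? (PySem.Str.lower c) <;>
            simp [hl1, pvA_ci, hlk]

-- ===== VERDICT (by name: the statement is the Claim_ definition above) =====
theorem ensure_field_spec : Claim_equal_ensure_field := by
  intro name columns fallback_list _dom _pre
  unfold Spec_ensure_field ensure_field ensure_field_alt
  rw [pvB_go_eq]
  cases h : pvA_exact columns fallback_list with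
  | some c => simp
  | none => cases h2 : pvA_ci (pvLowerMap columns) fallback_list <;> simp [h2]
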